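-- pv_equiv track=rewrite | github.com/williamedwards/17uofsc-codeathon-solutions | tetris/tetris.py | rotate_block
-- ===== SOURCE A (Python) =====
-- def rotate_block(block, r):
--     new_block = block[:]
--     for i in range(r):
--         # Get width
--         width = 0
--         for elem in new_block:
--             if elem[0] > width:
--                 width = elem[0]
--
--         # Compute the rotation
--         for j, elem in enumerate(new_block):
--             new_x = elem[1]
--             new_y = width - elem[0]
--             new_block[j] = (new_x, new_y)
--     return new_block
-- ===== SOURCE B (Python) =====
-- def rotate_block(block, r):
--     # The rotation map is eventually periodic with period 4 (after 4 rotations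
--     # the block is normalized and a further 4 rotations are the identity),
--     # so at most 7 actual rotations are ever needed.
--     reps = r if r < 8 else 4 + (r - 4) % 4
--     cells = list(block)
--     for _ in range(reps):
--         width = max([x for x, _ in cells] + [0])
--         cells = [(y, width - x) for x, y in cells]
--     return cells
-- ===== Notes on version B (the rewrite author's own statement) =====
-- stated objective: faster
-- what changed: B exploits that A's rotation map is eventually periodic with period 4 (after 4 rotations the block is normalized and 4 further rotations are the identity), so it reduces r to at most 7 actual rotations (r if r<8 else 4+(r-4)%4) and rebuilds each rotation with one comprehension instead of an in-place index loop.
import Mathlib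
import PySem

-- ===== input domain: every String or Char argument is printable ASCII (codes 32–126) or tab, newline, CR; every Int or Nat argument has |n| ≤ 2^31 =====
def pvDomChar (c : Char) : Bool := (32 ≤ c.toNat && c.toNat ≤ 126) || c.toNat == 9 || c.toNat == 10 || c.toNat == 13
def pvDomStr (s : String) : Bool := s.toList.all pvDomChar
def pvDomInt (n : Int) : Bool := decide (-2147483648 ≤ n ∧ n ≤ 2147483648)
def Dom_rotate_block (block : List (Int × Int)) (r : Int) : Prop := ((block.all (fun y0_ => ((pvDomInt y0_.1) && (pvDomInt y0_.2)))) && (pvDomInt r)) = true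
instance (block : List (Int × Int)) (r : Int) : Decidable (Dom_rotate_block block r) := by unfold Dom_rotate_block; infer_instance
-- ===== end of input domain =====

-- B reduces r to at most 7 rotations using the eventual period-4 of A's rotation map: asymptotically faster (O(n) vs O(r*n)).


-- ===== PORT A =====
-- width loop: 'width = 0; for elem in new_block: if elem[0] > width: width = elem[0]'
def pvWidthA (c : List (Int × Int)) : Int :=
  c.foldl (fun w e => if e.1 > w then e.1 else w) 0

def rotate_block (block : List (Int × Int)) (r : Int) : List (Int × Int) :=
  (PySem.List.pyRange 0 r 1).foldl (fun nb _ =>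
    let width := pvWidthA nb
    -- 'for j, elem in enumerate(new_block): new_block[j] = (elem[1], width - elem[0])'
    -- writes each index exactly once from its pre-loop element, i.e. a map
    nb.map (fun e => (e.2, width - e.1))) block

-- ===== PORT B =====
def rotate_block_alt (block : List (Int × Int)) (r : Int) : List (Int × Int) :=
  let reps : Int := if r < 8 then r else 4 + PySem.Int.mod (r - 4) 4
  (PySem.List.pyRange 0 reps 1).foldl (fun cells _ =>
    -- 'width = max([x for x, _ in cells] + [0])'
    let width := (PySem.List.max? (cells.map (fun p => p.1) ++ [0]) (fun y => y)).getD 0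
    cells.map (fun p => (p.2, width - p.1))) block

-- ===== PRECONDITION & SPEC =====
def Spec_rotate_block (block : List (Int × Int)) (r : Int) (out : List (Int × Int)) : Prop := out = rotate_block_alt block r
instance (block : List (Int × Int)) (r : Int) (out : List (Int × Int)) : Decidable (Spec_rotate_block block r out) := by unfold Spec_rotate_block; infer_instance

-- ===== CLAIM (what is proved, stated in full; the proofs are below) =====
def Claim_equal_rotate_block : Prop := ∀ (block : List (Int × Int)) (r : Int), Dom_rotate_block block r → Spec_rotate_block block r (rotate_block block r)

-- ===== LEMMAS AND PROOFS =====

-- the common rotation step and its width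
def pvW (c : List (Int × Int)) : Int := c.foldl (fun w e => max w e.1) 0
def pvStep (c : List (Int × Int)) : List (Int × Int) := c.map (fun p => (p.2, pvW c - p.1))
def pvRed (n : Nat) : Nat := if n < 8 then n else 4 + (n - 4) % 4

-- fold-max helpers on Int lists
theorem pv_fmax_pull (l : List Int) (a : Int) : ∀ b, l.foldl max (max a b) = max a (l.foldl max b) := by
  induction l with
  | nil => intro b; rfl
  | cons x t ih => intro b; simp only [List.foldl_cons, max_assoc]; exact ih (max b x)

theorem pv_le_fmax (l : List Int) : ∀ a : Int, a ≤ l.foldl max a := by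
  induction l with
  | nil => intro a; exact le_refl a
  | cons x t ih => intro a; exact le_trans (le_max_left a x) (ih (max a x))

theorem pv_mem_le_fmax (l : List Int) : ∀ (a x : Int), x ∈ l → x ≤ l.foldl max a := by
  induction l with
  | nil => intro a x h; cases h
  | cons y t ih =>
      intro a x h
      rcases List.mem_cons.mp h with h | h
      · subst h; exact le_trans (le_max_right a x) (pv_le_fmax t _)
      · exact ih _ x h

theorem pv_fmax_le (l : List Int) : ∀ (a K : Int), (∀ x ∈ l, x ≤ K) → a ≤ K → l.foldl max a ≤ K := by
  induction l with
  | nil => intro a K _ ha; exact ha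
  | cons x t ih =>
      intro a K h ha
      exact ih _ K (fun y hy => h y (List.mem_cons_of_mem _ hy))
        (max_le ha (h x (List.mem_cons_self)))

theorem pv_fmax_attained (l : List Int) : ∀ a : Int, l.foldl max a = a ∨ ∃ x ∈ l, l.foldl max a = x := by
  induction l with
  | nil => intro a; exact Or.inl rfl
  | cons x t ih =>
      intro a
      rcases ih (max a x) with h | ⟨y, hy, h⟩
      · by_cases hxa : x ≤ a
        · left; simpa [max_eq_left hxa] using h
        · right
          refine ⟨x, List.mem_cons_self, ?_⟩
          have hax : max a x = x := max_eq_right (by omega)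
          simpa [hax] using h
      · right; exact ⟨y, List.mem_cons_of_mem _ hy, h⟩

-- widths of the two ports equal pvW
theorem pvW_eq_map (c : List (Int × Int)) : pvW c = (c.map (fun p => p.1)).foldl max 0 := by
  simp [pvW, List.foldl_map]

theorem pvWidthA_eq (c : List (Int × Int)) : pvWidthA c = pvW c := by
  unfold pvWidthA pvW
  congr 1
  funext w e
  split <;> omega

theorem pvWidthB_eq (c : List (Int × Int)) :
    (PySem.List.max? (c.map (fun p => p.1) ++ [0]) (fun y => y)).getD 0 = pvW c := by
  cases c with
  | nil => rfl
  | cons p t =>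
      rw [show (p :: t).map (fun p => p.1) ++ [0] = p.1 :: (t.map (fun p => p.1) ++ [0]) by simp,
        PySem.List.max?_id_cons]
      simp only [Option.getD_some, List.foldl_append, List.foldl_cons, List.foldl_nil]
      rw [pvW_eq_map]
      simp only [List.map_cons, List.foldl_cons]
      rw [show max 0 p.1 = max 0 p.1 from rfl]
      rw [pv_fmax_pull (t.map (fun p => p.1)) 0 p.1]
      exact (max_comm _ _)

-- both loop bodies are pvStep
theorem pv_bodyA_eq : (fun (nb : List (Int × Int)) (_ : Int) =>
    let width := pvWidthA nb
    nb.map (fun e => (e.2, width - e.1))) = fun nb _ => pvStep nb := by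
  funext nb i
  simp only [pvWidthA_eq]
  rfl

theorem pv_bodyB_eq : (fun (cells : List (Int × Int)) (_ : Int) =>
    let width := (PySem.List.max? (cells.map (fun p => p.1) ++ [0]) (fun y => y)).getD 0
    cells.map (fun p => (p.2, width - p.1))) = fun cells _ => pvStep cells := by
  funext cells i
  simp only [pvWidthB_eq]
  rfl

-- fold of a constant-step body is iteration
theorem pv_foldl_iterate (l : List Int) : ∀ c : List (Int × Int),
    l.foldl (fun nb _ => pvStep nb) c = pvStep^[l.length] c := by
  induction l with
  | nil => intro c; rfl
  | cons x t ih =>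
      intro c
      simp only [List.foldl_cons, List.length_cons, Function.iterate_succ_apply, ih]

-- ===== eventual periodicity =====

theorem pv_step_nil : pvStep [] = [] := rfl

theorem pv_iterate_nil (n : Nat) : pvStep^[n] [] = [] := Function.iterate_fixed pv_step_nil n

-- every first coordinate is at most the width
theorem pv_fst_le_pvW (c : List (Int × Int)) (p : Int × Int) (hp : p ∈ c) : p.1 ≤ pvW c := by
  rw [pvW_eq_map]
  exact pv_mem_le_fmax _ 0 p.1 (List.mem_map_of_mem hp)

theorem pv_pvW_nonneg (c : List (Int × Int)) : 0 ≤ pvW c := by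
  rw [pvW_eq_map]; exact pv_le_fmax _ 0

-- second coordinates after one step are nonnegative
theorem pv_step_snd_nonneg (c : List (Int × Int)) (p : Int × Int) (hp : p ∈ pvStep c) : 0 ≤ p.2 := by
  rcases List.mem_map.mp hp with ⟨q, hq, rfl⟩
  have := pv_fst_le_pvW c q hq
  show 0 ≤ pvW c - q.1
  omega

-- first coordinates after one step are old second coordinates
theorem pv_step_fst_nonneg (c : List (Int × Int)) (h : ∀ p ∈ c, 0 ≤ p.2)
    (p : Int × Int) (hp : p ∈ pvStep c) : 0 ≤ p.1 := by
  rcases List.mem_map.mp hp with ⟨q, hq, heq⟩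
  rw [← heq]
  exact h q hq

-- a step of a list with nonnegative first coordinates has an element with second coordinate 0
theorem pv_step_exists_snd_zero (c : List (Int × Int)) (hne : c ≠ [])
    (hx : ∀ p ∈ c, 0 ≤ p.1) : ∃ p ∈ pvStep c, p.2 = 0 := by
  have hattain : ∃ q ∈ c, q.1 = pvW c := by
    have hW := pvW_eq_map c
    rcases pv_fmax_attained (c.map (fun p => p.1)) 0 with h | ⟨x, hx', h⟩
    · rcases List.exists_mem_of_ne_nil c hne with ⟨q, hq⟩
      have h0 : pvW c = 0 := by rw [hW, h]
      have h1 : 0 ≤ q.1 := hx q hq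
      have h2 : q.1 ≤ pvW c := pv_fst_le_pvW c q hq
      exact ⟨q, hq, by omega⟩
    · rcases List.mem_map.mp hx' with ⟨q, hq, hfst⟩
      exact ⟨q, hq, by rw [hfst, hW, h]⟩
  rcases hattain with ⟨q, hq, hqw⟩
  exact ⟨(q.2, pvW c - q.1), List.mem_map_of_mem hq, by simp [hqw]⟩

theorem pv_step_ne_nil (c : List (Int × Int)) (h : c ≠ []) : pvStep c ≠ [] := by
  simpa [pvStep] using h

theorem pv_fmax_eq (l : List Int) (K : Int) (hle : ∀ x ∈ l, x ≤ K)
    (hat : ∃ x ∈ l, x = K) (h0 : 0 ≤ K) : l.foldl max 0 = K := by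
  rcases hat with ⟨x, hx, rfl⟩
  exact le_antisymm (pv_fmax_le l 0 x hle h0) (pv_mem_le_fmax l 0 x hx)

theorem pv_it4 (b : List (Int × Int)) : pvStep^[4] b = pvStep (pvStep (pvStep (pvStep b))) := rfl

-- normalized blocks are fixed by four steps
theorem pv_step4_fixed (c : List (Int × Int))
    (hx : ∀ p ∈ c, 0 ≤ p.1) (hy : ∀ p ∈ c, 0 ≤ p.2)
    (ex : ∃ p ∈ c, p.1 = 0) (ey : ∃ p ∈ c, p.2 = 0) :
    pvStep^[4] c = c := by
  rw [pv_it4]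
  have hA0 : 0 ≤ pvW c := pv_pvW_nonneg c
  have hB0 : 0 ≤ (c.map (fun p => p.2)).foldl max 0 := pv_le_fmax _ 0
  set A := pvW c with hA
  set B := (c.map (fun p => p.2)).foldl max 0 with hB
  have hW1 : pvW (pvStep c) = B := by
    rw [hB, pvW_eq_map, pvStep, List.map_map]
    rfl
  have h2 : pvStep (pvStep c) = c.map (fun p => (A - p.1, B - p.2)) := by
    rw [show pvStep (pvStep c) = (pvStep c).map (fun p => (p.2, pvW (pvStep c) - p.1)) from rfl,
      hW1, pvStep, List.map_map]
    rfl
  have hW2 : pvW (pvStep (pvStep c)) = A := by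
    rw [h2, pvW_eq_map, List.map_map]
    refine pv_fmax_eq _ A ?_ ?_ hA0
    · intro x hxm
      rcases List.mem_map.mp hxm with ⟨p, hp, rfl⟩
      have := hx p hp
      simp only [Function.comp]
      omega
    · rcases ex with ⟨p, hp, hp0⟩
      refine ⟨A - p.1, List.mem_map_of_mem hp, by omega⟩
  have h3 : pvStep (pvStep (pvStep c)) = c.map (fun p => (B - p.2, p.1)) := by
    rw [show pvStep (pvStep (pvStep c)) =
        (pvStep (pvStep c)).map (fun p => (p.2, pvW (pvStep (pvStep c)) - p.1)) from rfl,
      hW2, h2, List.map_map]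
    refine List.map_congr_left ?_
    intro p _
    refine Prod.ext ?_ ?_ <;> simp
  have hW3 : pvW (pvStep (pvStep (pvStep c))) = B := by
    rw [h3, pvW_eq_map, List.map_map]
    refine pv_fmax_eq _ B ?_ ?_ hB0
    · intro x hxm
      rcases List.mem_map.mp hxm with ⟨p, hp, rfl⟩
      have := hy p hp
      simp only [Function.comp]
      omega
    · rcases ey with ⟨p, hp, hp0⟩
      refine ⟨B - p.2, List.mem_map_of_mem hp, by omega⟩
  rw [show pvStep (pvStep (pvStep (pvStep c))) =
      (pvStep (pvStep (pvStep c))).map (fun p => (p.2, pvW (pvStep (pvStep (pvStep c))) - p.1)) from rfl,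
    hW3, h3, List.map_map]
  have hid : ((fun p : Int × Int => (p.2, B - p.1)) ∘ fun p : Int × Int => (B - p.2, p.1)) = id := by
    funext p
    refine Prod.ext ?_ ?_ <;> simp
  rw [hid, List.map_id]

-- two steps of anything are nonnegative in both coordinates
theorem pv_step2_nonneg (b : List (Int × Int)) (p : Int × Int)
    (hp : p ∈ pvStep (pvStep b)) : 0 ≤ p.1 ∧ 0 ≤ p.2 :=
  ⟨pv_step_fst_nonneg (pvStep b) (pv_step_snd_nonneg b) p hp,
   pv_step_snd_nonneg (pvStep b) p hp⟩

-- any nonempty block is normalized after four steps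
theorem pv_step4_normal (b : List (Int × Int)) (hne : b ≠ []) :
    (∀ p ∈ pvStep^[4] b, 0 ≤ p.1) ∧ (∀ p ∈ pvStep^[4] b, 0 ≤ p.2) ∧
    (∃ p ∈ pvStep^[4] b, p.1 = 0) ∧ (∃ p ∈ pvStep^[4] b, p.2 = 0) := by
  rw [pv_it4]
  have hc1ne : pvStep (pvStep b) ≠ [] := pv_step_ne_nil _ (pv_step_ne_nil _ hne)
  have hc1x : ∀ p ∈ pvStep (pvStep b), 0 ≤ p.1 := fun p hp => (pv_step2_nonneg b p hp).1
  have hc1y : ∀ p ∈ pvStep (pvStep b), 0 ≤ p.2 := fun p hp => (pv_step2_nonneg b p hp).2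
  refine ⟨fun p hp => (pv_step2_nonneg _ p hp).1, fun p hp => (pv_step2_nonneg _ p hp).2, ?_, ?_⟩
  · -- an element of step c1 with second coordinate 0 becomes a first coordinate 0
    rcases pv_step_exists_snd_zero _ hc1ne hc1x with ⟨q, hq, hq0⟩
    exact ⟨(q.2, pvW (pvStep (pvStep (pvStep b))) - q.1), List.mem_map_of_mem hq, hq0⟩
  · refine pv_step_exists_snd_zero _ (pv_step_ne_nil _ hc1ne) ?_
    intro p hp
    rcases List.mem_map.mp hp with ⟨q, hq, heq⟩
    rw [← heq]
    exact hc1y q hq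

theorem pv_step8 (b : List (Int × Int)) : pvStep^[8] b = pvStep^[4] b := by
  by_cases hb : b = []
  · subst hb; simp [pv_iterate_nil]
  · have h := pv_step4_normal b hb
    have : pvStep^[8] b = pvStep^[4] (pvStep^[4] b) := by
      rw [← Function.iterate_add_apply]
    rw [this, pv_step4_fixed _ h.1 h.2.1 h.2.2.1 h.2.2.2]

theorem pv_iterate_red (n : Nat) (b : List (Int × Int)) (h : 8 ≤ n) :
    pvStep^[n] b = pvStep^[n - 4] b := by
  have h8 : (n - 8) + 8 = n := by omega
  have h4 : n - 8 + 4 = n - 4 := by omega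
  calc pvStep^[n] b = pvStep^[(n - 8) + 8] b := by rw [h8]
    _ = pvStep^[n - 8] (pvStep^[8] b) := Function.iterate_add_apply _ _ _ _
    _ = pvStep^[n - 8] (pvStep^[4] b) := by rw [pv_step8]
    _ = pvStep^[(n - 8) + 4] b := (Function.iterate_add_apply _ _ _ _).symm
    _ = pvStep^[n - 4] b := by rw [h4]

theorem pv_iterate_pvRed : ∀ (n : Nat) (b : List (Int × Int)), pvStep^[n] b = pvStep^[pvRed n] b := by
  intro n
  induction n using Nat.strong_induction_on with
  | _ n ih =>
    intro b
    by_cases h : n < 8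
    · simp [pvRed, h]
    · push Not at h
      rw [pv_iterate_red n b h, ih (n - 4) (by omega) b]
      congr 1
      unfold pvRed
      split <;> split <;> omega

-- ports as iterations
theorem pv_rotate_block_eq (block : List (Int × Int)) (r : Int) :
    rotate_block block r = pvStep^[r.toNat] block := by
  unfold rotate_block
  rw [pv_bodyA_eq, pv_foldl_iterate]
  congr 1
  rw [PySem.List.length_pyRange_one]
  omega

theorem pv_rotate_block_alt_eq (block : List (Int × Int)) (r : Int) :
    rotate_block_alt block r = pvStep^[(if r < 8 then r else 4 + PySem.Int.mod (r - 4) 4).toNat] block := by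
  unfold rotate_block_alt
  rw [pv_bodyB_eq, pv_foldl_iterate]
  congr 1
  rw [PySem.List.length_pyRange_one]
  omega

-- ===== VERDICT (by name: the statement is the Claim_ definition above) =====
theorem rotate_block_spec : Claim_equal_rotate_block := by
  intro block r _
  unfold Spec_rotate_block
  rw [pv_rotate_block_eq, pv_rotate_block_alt_eq,
    pv_iterate_pvRed r.toNat block,
    pv_iterate_pvRed (if r < 8 then r else 4 + PySem.Int.mod (r - 4) 4).toNat block]
  congr 1
  by_cases h : r < 8
  · simp [h]
  · push Not at h
    have hm : PySem.Int.mod (r - 4) 4 = (r - 4) % 4 := PySem.Int.mod_eq_emod_of_pos (by omega)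
    have h1 : 0 ≤ (r - 4) % 4 := Int.emod_nonneg _ (by omega)
    have h2 : (r - 4) % 4 < 4 := Int.emod_lt_of_pos _ (by omega)
    simp only [if_neg (not_lt.mpr h), hm]
    unfold pvRed
    split <;> split <;> omega
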